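-- pv_equiv track=rewrite | github.com/westdx/variousPython | stemLeaf.py | cleanStem
-- ===== SOURCE A (Python) =====
-- def cleanStem(file):
--     '''Return the argument with delimiter removed '''
--     delimiter = ["'",'"','~','`','!','@','#','$','%','^','&','*','(',')',
--                  '-','=','_','+',',','<','>','/','?',':',';','[',']','{',
--                  '}','|','.','\n']
--
--     #iterate the file and replace delimiter with space
--     for i in file:
--         if i in delimiter:
--             file = file.replace(i,' ')
--
--     return file
-- ===== SOURCE B (Python) =====
-- def cleanStem(file):
--     '''Return the argument with delimiter removed '''
--     delimiter = frozenset("'\"~`!@#$%^&*()-=_+,<>/?:;[]{}|.\n")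
--     # single left-to-right pass: emit a space for each delimiter character
--     return ''.join(' ' if ch in delimiter else ch for ch in file)
-- ===== Notes on version B (the rewrite author's own statement) =====
-- stated objective: faster
-- what changed: Replaces A's one full-string str.replace per delimiter character found (up to 30 whole-string passes) with a single left-to-right pass over the input that maps each delimiter character to a space and joins the result.
import Mathlib
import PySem

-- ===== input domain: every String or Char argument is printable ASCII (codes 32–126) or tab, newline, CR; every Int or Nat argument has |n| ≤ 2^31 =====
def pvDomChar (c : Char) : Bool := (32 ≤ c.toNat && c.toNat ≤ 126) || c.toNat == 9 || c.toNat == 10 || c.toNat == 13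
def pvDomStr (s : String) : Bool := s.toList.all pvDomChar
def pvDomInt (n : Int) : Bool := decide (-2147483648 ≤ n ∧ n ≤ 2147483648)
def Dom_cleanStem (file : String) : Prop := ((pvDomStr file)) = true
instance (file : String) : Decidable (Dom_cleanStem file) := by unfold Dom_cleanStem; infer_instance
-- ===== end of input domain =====

-- B replaces A's repeated whole-string str.replace (one pass per delimiter character found) with a single left-to-right pass mapping delimiter characters to spaces.


-- ===== PORT A =====
-- A's delimiter list, in A's order
def pvDelims : List Char :=
  ['\'', '"', '~', '`', '!', '@', '#', '$', '%', '^', '&', '*', '(', ')',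
   '-', '=', '_', '+', ',', '<', '>', '/', '?', ':', ';', '[', ']', '{',
   '}', '|', '.', '\n']

-- for i in file: if i in delimiter: file = file.replace(i, ' ')  — the loop iterates the
-- ORIGINAL string (the iterator is fixed when the for-loop starts) while `file` is rebound.
def cleanStem (file : String) : String :=
  file.toList.foldl
    (fun s i => if i ∈ pvDelims then PySem.Str.replace s (String.ofList [i]) " " else s)
    file

-- ===== PORT B =====
-- B's frozenset of delimiter characters
def pvDelimSet : PySem.Set Char :=
  PySem.Set.ofList "'\"~`!@#$%^&*()-=_+,<>/?:;[]{}|.\n".toList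

-- ''.join(' ' if ch in delimiter else ch for ch in file)
def cleanStem_alt (file : String) : String :=
  String.ofList (file.toList.map (fun ch => if ch ∈ pvDelimSet then ' ' else ch))

-- ===== PRECONDITION & SPEC =====
def Spec_cleanStem (file : String) (out : String) : Prop := out = cleanStem_alt file
instance (file : String) (out : String) : Decidable (Spec_cleanStem file out) := by unfold Spec_cleanStem; infer_instance

-- ===== CLAIM (what is proved, stated in full; the proofs are below) =====
def Claim_equal_cleanStem : Prop := ∀ (file : String), Dom_cleanStem file → Spec_cleanStem file (cleanStem file)

-- ===== LEMMAS AND PROOFS =====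

-- A's state after processing the characters in P: x is a space iff it is a delimiter seen in P
def pvG (P : List Char) (x : Char) : Char := if x ∈ pvDelims ∧ x ∈ P then ' ' else x

-- Python's str.replace with a one-character pattern is a character map (induction on replace's fuel loop)
theorem pv_go_single (c : Char) :
    ∀ (s acc : List Char) (fuel : Nat), s.length ≤ fuel →
      PySem.Chars.replace.go [c] [' '] fuel s acc
        = acc.reverse ++ s.map (fun x => if x = c then ' ' else x) := by
  intro s
  induction s with
  | nil =>
      intro acc fuel _
      cases fuel <;> simp [PySem.Chars.replace.go]
  | cons x t ih =>
      intro acc fuel hlen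
      cases fuel with
      | zero => simp at hlen
      | succ n =>
          have hn : t.length ≤ n := by simp at hlen; omega
          rw [PySem.Chars.replace.go.eq_def]
          by_cases hxc : c = x
          · subst hxc
            have hp : ([c].isPrefixOf (c :: t)) = true := by simp [List.isPrefixOf]
            simp only [hp, if_true]
            rw [show List.drop [c].length (c :: t) = t from rfl,
                show ([' '].reverse ++ acc) = ' ' :: acc from rfl, ih (' ' :: acc) n hn]
            simp
          · have hp : ([c].isPrefixOf (x :: t)) = false := by simp [List.isPrefixOf, hxc]
            simp only [hp, Bool.false_eq_true, if_false]
            rw [ih (x :: acc) n hn]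
            simp [Ne.symm hxc]

theorem pv_replace_single (s : List Char) (c : Char) :
    PySem.Chars.replace s [c] [' '] = s.map (fun x => if x = c then ' ' else x) := by
  simp [PySem.Chars.replace, pv_go_single c s [] s.length (le_refl _)]

theorem pvG_ext (P Q : List Char) (h : ∀ x, x ∈ P ↔ x ∈ Q) : pvG P = pvG Q := by
  funext x
  simp only [pvG, show (x ∈ P) = (x ∈ Q) from propext (h x)]

-- one loop step: replacing a delimiter c turns the state for P into the state for c :: P
theorem pv_step_mem (c : Char) (hc : c ∈ pvDelims) (P : List Char) (x : Char) :
    (if pvG P x = c then ' ' else pvG P x) = pvG (c :: P) x := by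
  have hsp : (' ' : Char) ∉ pvDelims := by decide
  by_cases hx : x ∈ pvDelims ∧ x ∈ P
  · have hne : (' ' : Char) ≠ c := fun h => hsp (h ▸ hc)
    rw [pvG, if_pos hx, if_neg hne, pvG, if_pos ⟨hx.1, List.mem_cons_of_mem _ hx.2⟩]
  · rw [pvG, if_neg hx]
    by_cases hxc : x = c
    · subst hxc
      rw [if_pos rfl, pvG, if_pos ⟨hc, List.mem_cons_self⟩]
    · have hx' : ¬ (x ∈ pvDelims ∧ x ∈ c :: P) := by
        rintro ⟨h1, h2⟩
        rcases List.mem_cons.mp h2 with h | h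
        · exact hxc h
        · exact hx ⟨h1, h⟩
      rw [if_neg hxc, pvG, if_neg hx']

theorem pv_step_not_mem (c : Char) (hc : c ∉ pvDelims) (P : List Char) (x : Char) :
    pvG P x = pvG (c :: P) x := by
  by_cases hx : x ∈ pvDelims ∧ x ∈ P
  · rw [pvG, if_pos hx, pvG, if_pos ⟨hx.1, List.mem_cons_of_mem _ hx.2⟩]
  · have hx' : ¬ (x ∈ pvDelims ∧ x ∈ c :: P) := by
      rintro ⟨h1, h2⟩
      rcases List.mem_cons.mp h2 with h | h
      · exact hc (h ▸ h1)
      · exact hx ⟨h1, h⟩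
    rw [pvG, if_neg hx, pvG, if_neg hx']

-- loop invariant: the accumulated string is the original mapped through pvG of the processed characters
theorem pv_loop (l : List Char) : ∀ (P s0 : List Char),
    l.foldl (fun s i => if i ∈ pvDelims then PySem.Str.replace s (String.ofList [i]) " " else s)
      (String.ofList (s0.map (pvG P)))
      = String.ofList (s0.map (pvG (l.reverse ++ P))) := by
  induction l with
  | nil => intro P s0; simp
  | cons c t ih =>
      intro P s0
      have hstep :
          (if c ∈ pvDelims then
              PySem.Str.replace (String.ofList (s0.map (pvG P))) (String.ofList [c]) " "
            else String.ofList (s0.map (pvG P)))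
            = String.ofList (s0.map (pvG (c :: P))) := by
        by_cases hc : c ∈ pvDelims
        · rw [if_pos hc]
          have hrep : PySem.Str.replace (String.ofList (s0.map (pvG P))) (String.ofList [c]) " "
              = String.ofList (PySem.Chars.replace (s0.map (pvG P)) [c] [' ']) := by
            simp [PySem.Str.replace]
          rw [hrep, pv_replace_single, List.map_map]
          congr 1
          exact List.map_congr_left (fun x _ => pv_step_mem c hc P x)
        · rw [if_neg hc]
          congr 1
          exact List.map_congr_left (fun x _ => pv_step_not_mem c hc P x)
      rw [List.foldl_cons, hstep, ih (c :: P) s0,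
          pvG_ext (t.reverse ++ c :: P) ((c :: t).reverse ++ P)
            (by
              intro x
              simp only [List.reverse_cons, List.mem_append, List.mem_cons]
              tauto)]

-- ===== VERDICT (by name: the statement is the Claim_ definition above) =====
theorem cleanStem_spec : Claim_equal_cleanStem := by
  intro file _
  unfold Spec_cleanStem cleanStem cleanStem_alt
  have hloop := pv_loop file.toList [] file.toList
  have hinit : String.ofList (file.toList.map (pvG [])) = file := by
    rw [show pvG [] = id from funext (fun x => by simp [pvG])]
    simp
  rw [hinit] at hloop
  rw [hloop]
  congr 1
  apply List.map_congr_left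
  intro x hx
  have hl : ("'\"~`!@#$%^&*()-=_+,<>/?:;[]{}|.\n".toList) = pvDelims := by decide
  have hset : x ∈ pvDelimSet ↔ x ∈ pvDelims := by
    rw [pvDelimSet, PySem.Set.mem_ofList, hl]
  have hmem : x ∈ file.toList.reverse ++ ([] : List Char) := by simpa using hx
  by_cases hd : x ∈ pvDelims
  · rw [pvG, if_pos ⟨hd, hmem⟩, if_pos (hset.mpr hd)]
  · rw [pvG, if_neg (fun h => hd h.1), if_neg (fun h => hd (hset.mp h))]
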